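-- pv_equiv track=rewrite | github.com/chiayewken/sutd-materials | deep_learning/hw4/part2/visual.py | invert_two_level_dict
-- ===== SOURCE A (Python) =====
-- def invert_two_level_dict(d):
--     new = {}
--     for key_outer in d.keys():
--         for key_inner, val in d[key_outer].items():
--             if key_inner not in new.keys():
--                 new[key_inner] = {}
--             new[key_inner][key_outer] = val
--     return new
-- ===== SOURCE B (Python) =====
-- def invert_two_level_dict(d):
--     # Index-first: collect all inner keys in first-encounter order, then for each
--     # inner key gather (outer_key, value) pairs by rescanning d.
--     inners = dict.fromkeys(ki for inner in d.values() for ki in inner)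
--     return {ki: {ko: d[ko][ki] for ko in d if ki in d[ko]} for ki in inners}
-- ===== Notes on version B (the rewrite author's own statement) =====
-- stated objective: alternative
-- what changed: Instead of A's single combined pass that incrementally creates and fills each inner dict, B first builds the index of all inner keys in first-encounter order (dict.fromkeys) and then gathers, per inner key, the (outer key, value) pairs by rescanning d with a comprehension - trading A's one pass for per-inner-key rescans (slower on large inputs).
import Mathlib
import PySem

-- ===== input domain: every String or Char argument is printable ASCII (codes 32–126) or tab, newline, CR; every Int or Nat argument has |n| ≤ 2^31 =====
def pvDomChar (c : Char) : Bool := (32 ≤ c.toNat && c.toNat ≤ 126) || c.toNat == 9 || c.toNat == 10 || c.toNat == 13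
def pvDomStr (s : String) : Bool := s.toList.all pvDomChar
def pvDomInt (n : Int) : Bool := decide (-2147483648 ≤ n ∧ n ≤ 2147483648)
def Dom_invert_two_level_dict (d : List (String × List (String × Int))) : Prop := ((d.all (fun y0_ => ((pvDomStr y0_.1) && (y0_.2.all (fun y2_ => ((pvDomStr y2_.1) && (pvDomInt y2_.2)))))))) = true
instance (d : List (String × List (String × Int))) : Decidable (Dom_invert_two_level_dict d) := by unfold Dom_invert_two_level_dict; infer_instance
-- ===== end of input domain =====

-- B inverts the nesting by an index-first decomposition (collect inner keys, then gather per key)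
-- instead of A's single pass that incrementally fills each inner dict; objective: alternative.

-- ===== PORT A =====
-- loop body of A's inner 'for key_inner, val in d[key_outer].items()':
--   'if key_inner not in new.keys(): new[key_inner] = {}' then 'new[key_inner][key_outer] = val'
def pvStep (key_outer : String) (new : PySem.Dict String (PySem.Dict String Int))
    (kv : String × Int) : PySem.Dict String (PySem.Dict String Int) :=
  let new := if PySem.Dict.contains new kv.1 then new
             else PySem.Dict.insert new kv.1 PySem.Dict.empty
  PySem.Dict.modify new kv.1 PySem.Dict.empty (fun m => PySem.Dict.insert m key_outer kv.2)

def invert_two_level_dict (d : List (String × List (String × Int))) :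
    List (String × List (String × Int)) :=
  -- the input dict of dicts, as PySem.Dicts
  let dd : PySem.Dict String (PySem.Dict String Int) :=
    PySem.Dict.mk (d.map (fun p => (p.1, PySem.Dict.mk p.2)))
  let new : PySem.Dict String (PySem.Dict String Int) :=
    (PySem.Dict.keys dd).foldl
      (fun new key_outer =>
        (PySem.Dict.getD dd key_outer PySem.Dict.empty).items.foldl (pvStep key_outer) new)
      PySem.Dict.empty
  new.items.map (fun p => (p.1, p.2.items))

-- ===== PORT B =====
-- the inner dict comprehension '{ko: d[ko][ki] for ko in d if ki in d[ko]}' (outer keys are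
-- distinct under Pre_, so the comprehension is this filterMap over d's pairs)
def pvGather (d : List (String × List (String × Int))) (ki : String) :
    List (String × Int) :=
  d.filterMap (fun p => (PySem.Dict.get? (PySem.Dict.mk p.2) ki).map (fun v => (p.1, v)))

def invert_two_level_dict_alt (d : List (String × List (String × Int))) :
    List (String × List (String × Int)) :=
  -- dict.fromkeys over all inner keys, in first-encounter order
  let inners : List String := PySem.List.dedup (d.flatMap (fun p => p.2.map Prod.fst))
  inners.map (fun ki => (ki, pvGather d ki))

-- ===== PRECONDITION & SPEC =====
-- Pre_ excludes association lists with duplicate outer keys or duplicate keys inside an inner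
-- list: those do not represent Python dicts (A's argument is a dict of dicts, whose keys are
-- necessarily distinct), so A's behaviour on them is not defined by the source.
def Pre_invert_two_level_dict (d : List (String × List (String × Int))) : Prop :=
  (d.map Prod.fst).Nodup ∧ ∀ p ∈ d, (p.2.map Prod.fst).Nodup
instance (d : List (String × List (String × Int))) : Decidable (Pre_invert_two_level_dict d) := by
  unfold Pre_invert_two_level_dict; infer_instance

def pvWitness_invert_two_level_dict : (List (String × List (String × Int))) :=
  [("a", [("x", 1), ("y", 2)]), ("b", [("x", 3)])]

def Spec_invert_two_level_dict (d : List (String × List (String × Int)))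
    (out : List (String × List (String × Int))) : Prop := out = invert_two_level_dict_alt d
instance (d : List (String × List (String × Int))) (out : List (String × List (String × Int))) :
    Decidable (Spec_invert_two_level_dict d out) := by
  unfold Spec_invert_two_level_dict; infer_instance

-- ===== CLAIM (what is proved, stated in full; the proofs are below) =====
def Claim_equal_invert_two_level_dict : Prop :=
  ∀ (d : List (String × List (String × Int))), Dom_invert_two_level_dict d →
    Pre_invert_two_level_dict d →
    Spec_invert_two_level_dict d (invert_two_level_dict d)

-- ===== LEMMAS AND PROOFS =====

-- the shape of A's accumulator: the dict whose keys are `keys`, with `f k` behind key k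
def pvGraph (keys : List String) (f : String → List (String × Int)) :
    PySem.Dict String (PySem.Dict String Int) :=
  PySem.Dict.mk (keys.map (fun k => (k, PySem.Dict.mk (f k))))

-- the contribution of one outer pair (ko, inner) to the row of inner key k
def pvOpt (inner : List (String × Int)) (ko k : String) : List (String × Int) :=
  ((PySem.Dict.get? (PySem.Dict.mk inner) k).map (fun v => (ko, v))).toList

-- all inner keys of d, in first-encounter order (B's `inners`)
def pvInners (d : List (String × List (String × Int))) : List String :=
  PySem.List.dedup (d.flatMap (fun p => p.2.map Prod.fst))

lemma pv_get?_mk_eq_none (m : List (String × Int)) (k : String) (h : k ∉ m.map Prod.fst) :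
    PySem.Dict.get? (PySem.Dict.mk m) k = none := by
  simp [PySem.Dict.get?, List.find?_eq_none]
  intro a b hm hbeq
  exact h (List.mem_map.2 ⟨(a,b), hm, by simpa using hbeq⟩)

lemma pv_contains_graph (keys : List String) (f : String → List (String × Int)) (x : String) :
    PySem.Dict.contains (pvGraph keys f) x = decide (x ∈ keys) := by
  simp [pvGraph, PySem.Dict.contains, List.any_map]
  rcases em (x ∈ keys) with h | h
  · simp [h]
  · simp [h]; intro a ha e; exact h (e ▸ ha)

lemma pv_get?_graph (keys : List String) (f : String → List (String × Int)) (x : String) :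
    PySem.Dict.get? (pvGraph keys f) x =
      if x ∈ keys then some (PySem.Dict.mk (f x)) else none := by
  induction keys with
  | nil => simp [pvGraph, PySem.Dict.get?]
  | cons a as ih =>
    rw [pvGraph, List.map_cons, PySem.Dict.get?_mk_cons]
    by_cases hax : a = x
    · simp [hax]
    · simp only [beq_iff_eq, hax, if_false]
      rw [← pvGraph, ih]
      simp [Ne.symm hax]

lemma pv_insert_graph (keys : List String) (f : String → List (String × Int)) (ki : String)
    (g : List (String × Int)) :
    PySem.Dict.insert (pvGraph keys f) ki (PySem.Dict.mk g) =
      pvGraph (PySem.Set.add keys ki) (fun k => if k = ki then g else f k) := by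
  by_cases h : ki ∈ keys
  · rw [PySem.Dict.insert, pv_contains_graph]
    simp only [h, decide_true, if_true]
    rw [PySem.Set.add_of_mem h]
    unfold pvGraph
    congr 1
    rw [List.map_map]
    apply List.map_congr_left
    intro k _
    by_cases hk : k = ki <;> simp [hk]
  · rw [PySem.Dict.insert, pv_contains_graph]
    simp only [h, decide_false, Bool.false_eq_true, if_false]
    rw [PySem.Set.add_of_not_mem h]
    unfold pvGraph
    congr 1
    rw [List.map_append]
    congr 1
    · apply List.map_congr_left
      intro k hk
      have : k ≠ ki := fun e => h (e ▸ hk)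
      simp [this]
    · simp

lemma pv_insert_fresh (m : List (String × Int)) (ko : String) (v : Int)
    (h : ∀ pr ∈ m, pr.1 ≠ ko) :
    PySem.Dict.insert (PySem.Dict.mk m) ko v = PySem.Dict.mk (m ++ [(ko, v)]) := by
  rw [PySem.Dict.insert]
  have : PySem.Dict.contains (PySem.Dict.mk m) ko = false := by
    simp [PySem.Dict.contains]
    exact fun a b hm e => (h (a,b) hm) e
  simp [this]

lemma pv_step_graph (ko : String) (keys : List String) (f : String → List (String × Int))
    (ki : String) (v : Int)
    (hf0 : ∀ k, k ∉ keys → f k = [])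
    (hko : ∀ pr ∈ f ki, pr.1 ≠ ko) :
    pvStep ko (pvGraph keys f) (ki, v) =
      pvGraph (PySem.Set.add keys ki) (fun k => if k = ki then f ki ++ [(ko, v)] else f k) := by
  unfold pvStep PySem.Dict.modify
  simp only [pv_contains_graph]
  by_cases hki : ki ∈ keys
  · simp only [hki, decide_true, if_true]
    rw [PySem.Dict.getD_eq_get?_getD, pv_get?_graph]
    simp only [hki, if_true, Option.getD_some]
    rw [pv_insert_fresh _ _ _ hko, pv_insert_graph]
  · simp only [hki, decide_false, Bool.false_eq_true, if_false]
    have hempty : (PySem.Dict.empty : PySem.Dict String Int) = PySem.Dict.mk [] := rfl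
    rw [hempty, pv_insert_graph]
    have hmem : ki ∈ PySem.Set.add keys ki := (PySem.Set.mem_add _ _ _).2 (Or.inr rfl)
    rw [PySem.Dict.getD_eq_get?_getD, pv_get?_graph]
    simp only [hmem, if_true, Option.getD_some]
    rw [pv_insert_fresh _ _ _ (by simp), pv_insert_graph, PySem.Set.add_of_mem hmem]
    congr 1
    funext k
    by_cases hk : k = ki <;> simp [hk, hf0 ki hki]

lemma pv_inner_fold (ko : String) (inner : List (String × Int)) :
    ∀ (keys : List String) (f : String → List (String × Int)),
    (inner.map Prod.fst).Nodup →
    (∀ k, k ∉ keys → f k = []) →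
    (∀ q ∈ inner, ∀ pr ∈ f q.1, pr.1 ≠ ko) →
    inner.foldl (pvStep ko) (pvGraph keys f) =
      pvGraph (PySem.Set.update keys (inner.map Prod.fst))
        (fun k => f k ++ pvOpt inner ko k) := by
  induction inner with
  | nil =>
    intro keys f _ _ _
    simp only [List.foldl_nil, List.map_nil, PySem.Set.update_nil]
    congr 1
    funext k
    simp [pvOpt, PySem.Dict.get?]
  | cons q rest ih =>
    intro keys f hnd hf0 hko
    obtain ⟨ki, v⟩ := q
    have hnd' : (ki :: rest.map Prod.fst).Nodup := by simpa using hnd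
    have hki_rest : ki ∉ rest.map Prod.fst := (List.nodup_cons.1 hnd').1
    rw [List.foldl_cons, pv_step_graph ko keys f ki v hf0 (hko (ki, v) List.mem_cons_self)]
    rw [ih (PySem.Set.add keys ki) _
      (by simpa using (List.nodup_cons.1 hnd').2)
      (by
        intro k hk
        have hkki : k ≠ ki := fun e => hk (e ▸ (PySem.Set.mem_add _ _ _).2 (Or.inr rfl))
        have hknk : k ∉ keys := fun hm => hk ((PySem.Set.mem_add _ _ _).2 (Or.inl hm))
        simp [hkki, hf0 k hknk])
      (by
        intro q' hq' pr hpr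
        have hne : q'.1 ≠ ki := fun e => hki_rest (e ▸ List.mem_map.2 ⟨q', hq', rfl⟩)
        exact hko q' (List.mem_cons_of_mem _ hq') pr (by simpa [hne] using hpr))]
    rw [List.map_cons, PySem.Set.update_cons]
    congr 1
    funext k
    by_cases hk : k = ki
    · subst hk
      have h1 : pvOpt rest ko k = [] := by
        rw [pvOpt, pv_get?_mk_eq_none _ _ hki_rest]; rfl
      have h2 : pvOpt ((k, v) :: rest) ko k = [(ko, v)] := by
        rw [pvOpt, PySem.Dict.get?_mk_cons]; simp
      simp [h1, h2]
    · have h2 : pvOpt ((ki, v) :: rest) ko k = pvOpt rest ko k := by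
        rw [pvOpt, PySem.Dict.get?_mk_cons]
        simp [Ne.symm hk]
        rfl
      simp [hk, h2]

lemma pv_mem_inners (d : List (String × List (String × Int))) (k : String) :
    k ∈ pvInners d ↔ ∃ p ∈ d, k ∈ p.2.map Prod.fst := by
  simp [pvInners, PySem.List.dedup_eq_ofList, PySem.Set.mem_ofList, List.mem_flatMap]

lemma pv_gather_append (d : List (String × List (String × Int))) (p : String × List (String × Int))
    (ki : String) :
    pvGather (d ++ [p]) ki = pvGather d ki ++ pvOpt p.2 p.1 ki := by
  rw [pvGather, List.filterMap_append]
  congr 1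

lemma pv_gather_nil (d : List (String × List (String × Int))) (ki : String)
    (h : ¬ ∃ p ∈ d, ki ∈ p.2.map Prod.fst) : pvGather d ki = [] := by
  rw [pvGather, List.filterMap_eq_nil_iff]
  intro p hp
  rw [pv_get?_mk_eq_none]
  · rfl
  · exact fun hm => h ⟨p, hp, hm⟩

lemma pv_gather_fst_mem (d : List (String × List (String × Int))) (ki : String)
    (pr : String × Int) (h : pr ∈ pvGather d ki) : pr.1 ∈ d.map Prod.fst := by
  rw [pvGather, List.mem_filterMap] at h
  obtain ⟨p, hp, heq⟩ := h
  rcases hg : PySem.Dict.get? (PySem.Dict.mk p.2) ki with _ | v <;> rw [hg] at heq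
  · simp at heq
  · simp at heq
    exact List.mem_map.2 ⟨p, hp, by rw [← heq]⟩

lemma pv_A_eq_foldpairs (d : List (String × List (String × Int)))
    (hnd : (d.map Prod.fst).Nodup) :
    invert_two_level_dict d =
      (d.foldl (fun new p => p.2.foldl (pvStep p.1) new) PySem.Dict.empty).items.map
        (fun p => (p.1, p.2.items)) := by
  rw [invert_two_level_dict]
  have hkeys : PySem.Dict.keys (PySem.Dict.mk (d.map (fun p => (p.1, PySem.Dict.mk p.2)))) =
      d.map Prod.fst := by
    simp [PySem.Dict.keys]
  rw [hkeys, List.foldl_map]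
  congr 2
  apply PySem.List.foldl_congr_mem
  intro acc p hp
  have hitems : (p.1, PySem.Dict.mk p.2) ∈
      (PySem.Dict.mk (d.map (fun p => (p.1, PySem.Dict.mk p.2)))).items :=
    List.mem_map.2 ⟨p, hp, rfl⟩
  have hnd' : (PySem.Dict.mk (d.map (fun p => (p.1, PySem.Dict.mk p.2)))).keys.Nodup := by
    rw [hkeys]; exact hnd
  rw [PySem.Dict.getD_of_mem_items _ hitems hnd']

lemma pv_main (d : List (String × List (String × Int)))
    (hpre : Pre_invert_two_level_dict d) :
    d.foldl (fun new p => p.2.foldl (pvStep p.1) new) PySem.Dict.empty =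
      pvGraph (pvInners d) (pvGather d) := by
  induction d using List.reverseRecOn with
  | nil => rfl
  | append_singleton d p ih =>
    obtain ⟨hnd, hinner⟩ := hpre
    rw [List.map_append] at hnd
    rcases List.nodup_append.mp hnd with ⟨hA, _, hdisj⟩
    have hko : p.1 ∉ d.map Prod.fst := fun hm => hdisj p.1 hm p.1 (by simp) rfl
    have hpred : Pre_invert_two_level_dict d :=
      ⟨hA, fun q hq => hinner q (List.mem_append_left _ hq)⟩
    rw [List.foldl_append, List.foldl_cons, List.foldl_nil, ih hpred]
    rw [pv_inner_fold p.1 p.2 (pvInners d) (pvGather d)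
      (hinner p (List.mem_append_right _ (by simp)))
      (fun k hk => pv_gather_nil d k (fun hex => hk ((pv_mem_inners d k).2 hex)))
      (fun q hq pr hpr e => hko (e ▸ pv_gather_fst_mem d q.1 pr hpr))]
    have hI : pvInners (d ++ [p]) = PySem.Set.update (pvInners d) (p.2.map Prod.fst) := by
      rw [pvInners, pvInners, PySem.List.dedup_eq_ofList, PySem.List.dedup_eq_ofList,
        List.flatMap_append, PySem.Set.ofList_append]
      simp
    rw [hI]
    congr 1
    funext k
    rw [pv_gather_append]

-- ===== VERDICT (by name: the statement is the Claim_ definition above) =====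
theorem invert_two_level_dict_spec : Claim_equal_invert_two_level_dict := by
  intro d _ hpre
  unfold Spec_invert_two_level_dict
  rw [pv_A_eq_foldpairs d hpre.1, pv_main d hpre]
  simp [pvGraph, invert_two_level_dict_alt, pvInners]
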